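-- pv_equiv track=rewrite | github.com/CIPFZ/youtobe-parser | app/translator.py | _parse_batch_output
-- ===== SOURCE A (Python) =====
-- def _parse_batch_output(content: str, fallback: list[str]) -> list[str]:
--     parsed: dict[int, str] = {}
--     for raw in content.splitlines():
--         line = raw.strip()
--         if '\t' not in line:
--             continue
--         idx_str, txt = line.split('\t', 1)
--         if idx_str.isdigit():
--             parsed[int(idx_str)] = txt.strip()
--
--     out: list[str] = []
--     for idx, origin in enumerate(fallback, start=1):
--         out.append(parsed.get(idx, origin))
--     return out
-- ===== SOURCE B (Python) =====
-- def _parse_line(raw):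
--     line = raw.strip()
--     if '\t' not in line:
--         return None
--     idx_str, txt = line.split('\t', 1)
--     if not idx_str.isdigit():
--         return None
--     return int(idx_str), txt.strip()
--
--
-- def _parse_batch_output(content: str, fallback: list[str]) -> list[str]:
--     out = list(fallback)
--     for raw in content.splitlines():
--         kv = _parse_line(raw)
--         if kv is not None:
--             idx, txt = kv
--             if 1 <= idx <= len(fallback):
--                 out[idx - 1] = txt
--     return out
-- ===== Notes on version B (the rewrite author's own statement) =====
-- stated objective: simpler
-- what changed: B drops the intermediate dict and the second lookup loop: it starts from a copy of fallback and overwrites slots in place during a single pass over the lines (out-of-range indices skipped, last write wins).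
import Mathlib
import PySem

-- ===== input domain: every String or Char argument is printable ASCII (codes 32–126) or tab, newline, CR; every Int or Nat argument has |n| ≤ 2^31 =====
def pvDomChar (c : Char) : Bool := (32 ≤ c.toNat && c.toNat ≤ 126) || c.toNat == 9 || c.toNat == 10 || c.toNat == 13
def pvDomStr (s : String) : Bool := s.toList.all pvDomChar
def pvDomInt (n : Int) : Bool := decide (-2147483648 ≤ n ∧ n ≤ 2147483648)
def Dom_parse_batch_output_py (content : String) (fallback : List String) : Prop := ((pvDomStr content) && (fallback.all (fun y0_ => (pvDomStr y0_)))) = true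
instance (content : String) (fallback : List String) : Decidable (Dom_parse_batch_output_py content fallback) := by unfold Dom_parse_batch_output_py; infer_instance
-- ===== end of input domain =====

-- B replaces A's intermediate dict + second lookup loop by a single pass that overwrites
-- a copy of fallback in place (objective: simpler); return values proved equal on all inputs.


-- helper _parse_line of Source B (PORT B's helper; defined first in the file):
-- strip, require a tab, split once on it, require a digit index
def pvParseLine (raw : String) : Option (Int × String) :=
  let line := PySem.Str.strip raw
  if PySem.Str.isIn "\t" line then
    match PySem.Str.splitMax? line "\t" 1 with
    | some (idx_str :: txt :: _) =>
        if PySem.Str.strIsdigit idx_str then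
          some ((PySem.Int.ofStr? idx_str).getD 0, PySem.Str.strip txt)
        else none
    | _ => none
  else none

-- ===== PORT A =====
-- literal transliteration of A: build a dict keyed by the parsed index, then a second
-- loop over enumerate(fallback, 1) falls back to the original at each index
-- ((PySem.Int.ofStr? …).getD 0 is only read under strIsdigit, where int() cannot raise)
def parse_batch_output_py (content : String) (fallback : List String) : List String :=
  let parsed : PySem.Dict Int String :=
    (PySem.Str.splitlines content).foldl (fun d raw =>
      let line := PySem.Str.strip raw
      if PySem.Str.isIn "\t" line then
        match PySem.Str.splitMax? line "\t" 1 with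
        | some parts =>
            match parts with
            | idx_str :: txt :: _ =>
                if PySem.Str.strIsdigit idx_str then
                  d.insert ((PySem.Int.ofStr? idx_str).getD 0) (PySem.Str.strip txt)
                else d
            | _ => d
        | none => d
      else d) PySem.Dict.empty
  (PySem.List.enumerate fallback 1).map (fun p => parsed.getD p.1 p.2)

-- ===== PORT B =====
def parse_batch_output_py_alt (content : String) (fallback : List String) : List String :=
  (PySem.Str.splitlines content).foldl (fun out raw =>
    match pvParseLine raw with
    | some (idx, txt) =>
        if 1 ≤ idx ∧ idx ≤ (fallback.length : Int) then
          PySem.List.pySetD out (idx - 1) txt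
        else out
    | none => out) fallback

-- ===== PRECONDITION & SPEC =====
def Spec_parse_batch_output_py (content : String) (fallback : List String) (out : List String) : Prop := out = parse_batch_output_py_alt content fallback
instance (content : String) (fallback : List String) (out : List String) : Decidable (Spec_parse_batch_output_py content fallback out) := by unfold Spec_parse_batch_output_py; infer_instance

-- ===== CLAIM (what is proved, stated in full; the proofs are below) =====
def Claim_equal_parse_batch_output_py : Prop := ∀ (content : String) (fallback : List String), Dom_parse_batch_output_py content fallback → Spec_parse_batch_output_py content fallback (parse_batch_output_py content fallback)

-- ===== LEMMAS AND PROOFS =====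

-- A's loop body, written through pvParseLine
theorem pvStepA_eq (d : PySem.Dict Int String) (raw : String) :
    (let line := PySem.Str.strip raw
     if PySem.Str.isIn "\t" line then
       match PySem.Str.splitMax? line "\t" 1 with
       | some parts =>
           match parts with
           | idx_str :: txt :: _ =>
               if PySem.Str.strIsdigit idx_str then
                 d.insert ((PySem.Int.ofStr? idx_str).getD 0) (PySem.Str.strip txt)
               else d
           | _ => d
       | none => d
     else d)
    = (match pvParseLine raw with
       | some (idx, txt) => d.insert idx txt
       | none => d) := by
  unfold pvParseLine
  cases htab : PySem.Str.isIn "\t" (PySem.Str.strip raw)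
  · simp only [htab, Bool.false_eq_true, if_false]
  · simp only [htab, if_true]
    cases hsp : PySem.Str.splitMax? (PySem.Str.strip raw) "\t" 1 with
    | none => rfl
    | some parts =>
      cases parts with
      | nil => rfl
      | cons a tl =>
        cases tl with
        | nil => rfl
        | cons b tl2 =>
          cases hdig : PySem.Str.strIsdigit a
          · simp only [hdig, Bool.false_eq_true, if_false]
          · simp only [hdig, if_true]

-- invariant tying the dict to the overlay array
def pvRel (fb : List String) (d : PySem.Dict Int String) (out : List String) : Prop :=
  out.length = fb.length ∧
  ∀ i : Nat, i < fb.length → out[i]? = some ((d.get? ((i : Int) + 1)).getD fb[i]!)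

theorem pvRel_step (fb : List String) (d : PySem.Dict Int String) (out : List String)
    (raw : String) (h : pvRel fb d out) :
    pvRel fb
      (match pvParseLine raw with
       | some (idx, txt) => d.insert idx txt
       | none => d)
      (match pvParseLine raw with
       | some (idx, txt) =>
           if 1 ≤ idx ∧ idx ≤ (fb.length : Int) then
             PySem.List.pySetD out (idx - 1) txt
           else out
       | none => out) := by
  obtain ⟨hlen, hget⟩ := h
  cases hkv : pvParseLine raw with
  | none => exact ⟨hlen, hget⟩
  | some kv =>
    obtain ⟨idx, txt⟩ := kv
    dsimp only
    by_cases hr : 1 ≤ idx ∧ idx ≤ (fb.length : Int)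
    · rw [if_pos hr]
      refine ⟨?_, ?_⟩
      · rw [PySem.List.pySetD_of_nonneg _ _ (by omega), List.length_set, hlen]
      · intro i hi
        rw [PySem.List.pySetD_of_nonneg _ _ (by omega), List.getElem?_set]
        by_cases hieq : (i : Int) + 1 = idx
        · have : (idx - 1).toNat = i := by omega
          rw [if_pos (show (idx - 1).toNat < out.length by omega), hieq,
              PySem.Dict.get?_insert_self]
          simp [this]
        · have hne : (idx - 1).toNat ≠ i := by omega
          rw [if_neg hne, PySem.Dict.get?_insert_of_ne]
          · exact hget i hi
          · exact hieq
    · rw [if_neg hr]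
      refine ⟨hlen, ?_⟩
      intro i hi
      rw [PySem.Dict.get?_insert_of_ne]
      · exact hget i hi
      · omega

theorem pvRel_foldl (ls : List String) (fb : List String)
    (d : PySem.Dict Int String) (out : List String) (h : pvRel fb d out) :
    pvRel fb
      (ls.foldl (fun d raw =>
        match pvParseLine raw with
        | some (idx, txt) => d.insert idx txt
        | none => d) d)
      (ls.foldl (fun out raw =>
        match pvParseLine raw with
        | some (idx, txt) =>
            if 1 ≤ idx ∧ idx ≤ (fb.length : Int) then
              PySem.List.pySetD out (idx - 1) txt
            else out
        | none => out) out) := by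
  induction ls generalizing d out with
  | nil => exact h
  | cons x xs ih =>
    exact ih _ _ (pvRel_step fb d out x h)

-- ===== VERDICT (by name: the statement is the Claim_ definition above) =====
theorem parse_batch_output_py_spec : Claim_equal_parse_batch_output_py := by
  intro content fallback _
  unfold Spec_parse_batch_output_py parse_batch_output_py parse_batch_output_py_alt
  have hstep : ∀ (d : PySem.Dict Int String) (raw : String),
      (fun d raw =>
        let line := PySem.Str.strip raw
        if PySem.Str.isIn "\t" line then
          match PySem.Str.splitMax? line "\t" 1 with
          | some parts =>
              match parts with
              | idx_str :: txt :: _ =>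
                  if PySem.Str.strIsdigit idx_str then
                    d.insert ((PySem.Int.ofStr? idx_str).getD 0) (PySem.Str.strip txt)
                  else d
              | _ => d
          | none => d
        else d) d raw
      = (match pvParseLine raw with
         | some (idx, txt) => d.insert idx txt
         | none => d) := fun d raw => pvStepA_eq d raw
  rw [show (List.foldl (fun d raw =>
        let line := PySem.Str.strip raw
        if PySem.Str.isIn "\t" line then
          match PySem.Str.splitMax? line "\t" 1 with
          | some parts =>
              match parts with
              | idx_str :: txt :: _ =>
                  if PySem.Str.strIsdigit idx_str then
                    d.insert ((PySem.Int.ofStr? idx_str).getD 0) (PySem.Str.strip txt)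
                  else d
              | _ => d
          | none => d
        else d) PySem.Dict.empty (PySem.Str.splitlines content))
      = List.foldl (fun d raw =>
          match pvParseLine raw with
          | some (idx, txt) => d.insert idx txt
          | none => d) PySem.Dict.empty (PySem.Str.splitlines content)
    from PySem.List.foldl_congr_mem _ _ _ _ (fun acc x _ => hstep acc x)]
  have hrel := pvRel_foldl (PySem.Str.splitlines content) fallback
      PySem.Dict.empty fallback
      ⟨rfl, by intro i hi; simp [PySem.Dict.get?_empty, List.getElem!_eq_getElem?_getD,
                                 List.getElem?_eq_getElem hi]⟩
  obtain ⟨hlen, hget⟩ := hrel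
  apply List.ext_getElem?
  intro k
  by_cases hk : k < fallback.length
  · have hk' : k < (PySem.List.enumerate fallback 1).length := by
      rw [PySem.List.length_enumerate]; exact hk
    rw [List.getElem?_map, List.getElem?_eq_getElem hk', PySem.List.getElem_enumerate,
        hget k hk]
    simp only [Option.map_some, Option.some.injEq]
    rw [PySem.Dict.getD_eq_get?_getD, show (1 : Int) + (k : Int) = (k : Int) + 1 from by omega]
    congr 1
    simp [List.getElem!_eq_getElem?_getD, List.getElem?_eq_getElem hk]
  · rw [List.getElem?_eq_none, List.getElem?_eq_none]
    · omega
    · simp [PySem.List.length_enumerate]; omega
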